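-- pv_equiv track=rewrite | github.com/commitconfirm/mnm | controller/app/plugin_writer.py | _dedup_by_constraint
-- ===== SOURCE A (Python) =====
-- from collections import OrderedDict
-- from typing import Iterable, Optional
--
-- def _dedup_by_constraint(
--     entries: Iterable[dict],
--     constraint_keys: tuple[str, ...],
-- ) -> list[dict]:
--     """Deduplicate upsert dicts by their unique constraint key.
--
--     Last entry wins (consistent with ``ON CONFLICT DO UPDATE``
--     semantics). Required by Block C P3/P4/P5 lesson — Postgres
--     raises ``CardinalityViolationError`` when an
--     ``INSERT ... ON CONFLICT`` batch contains rows that collide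
--     on the conflict target. Dedup at the adapter prevents batch
--     loss; the BLE001 guard at the upsert prevents task crash.
--     """
--     seen: "OrderedDict[tuple, dict]" = OrderedDict()
--     for entry in entries:
--         key = tuple(entry.get(k) for k in constraint_keys)
--         seen[key] = entry
--     return list(seen.values())
-- ===== SOURCE B (Python) =====
-- def _dedup_by_constraint(entries, constraint_keys):
--     entries = list(entries)
--     keys = [tuple(e.get(k) for k in constraint_keys) for e in entries]
--     last = dict(zip(keys, entries))  # later pairs overwrite earlier ones: last wins
--     out = []
--     emitted = set()
--     for key in keys:
--         if key not in emitted: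
--             emitted.add(key)
--             out.append(last[key])
--     return out
-- ===== Notes on version B (the rewrite author's own statement) =====
-- stated objective: alternative
-- what changed: Replaces A's single-pass OrderedDict-of-entries (overwrite-in-dict, then .values()) by a staged two-pass algorithm: first precompute the key of every entry and a plain dict mapping each key to its last entry, then re-scan the key list and emit that last entry at each key's first occurrence, tracked with a set.
import Mathlib
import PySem

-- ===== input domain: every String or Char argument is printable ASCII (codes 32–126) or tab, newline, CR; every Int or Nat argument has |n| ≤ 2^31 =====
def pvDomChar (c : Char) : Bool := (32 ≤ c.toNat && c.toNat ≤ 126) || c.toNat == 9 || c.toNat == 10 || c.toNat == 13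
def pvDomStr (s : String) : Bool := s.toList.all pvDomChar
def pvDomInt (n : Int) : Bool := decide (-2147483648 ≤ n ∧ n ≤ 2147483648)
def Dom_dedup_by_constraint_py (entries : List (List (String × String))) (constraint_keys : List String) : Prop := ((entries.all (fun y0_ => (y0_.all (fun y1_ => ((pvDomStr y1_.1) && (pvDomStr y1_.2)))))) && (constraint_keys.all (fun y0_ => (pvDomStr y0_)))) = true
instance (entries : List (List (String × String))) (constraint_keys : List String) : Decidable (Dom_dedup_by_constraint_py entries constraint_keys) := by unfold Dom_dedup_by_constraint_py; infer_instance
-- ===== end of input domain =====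

-- B replaces A's single-pass OrderedDict overwrite by two staged passes: a dict of the
-- LAST entry per key, then a re-scan of the key list emitting it at each key's FIRST
-- occurrence (objective: alternative decomposition, same cost).

-- shared helper: key = tuple(entry.get(k) for k in constraint_keys)  (both Pythons compute it identically)
def pvKeyOf (entry : List (String × String)) (constraint_keys : List String) : List (Option String) :=
  constraint_keys.map (fun k => (PySem.Dict.mk entry).get? k)

-- ===== PORT A =====
def dedup_by_constraint_py (entries : List (List (String × String))) (constraint_keys : List String) : List (List (String × String)) :=
  (entries.foldl
    (fun (seen : PySem.Dict (List (Option String)) (List (String × String))) entry =>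
      seen.insert (pvKeyOf entry constraint_keys) entry)
    PySem.Dict.empty).values

-- ===== PORT B =====
def dedup_by_constraint_py_alt (entries : List (List (String × String))) (constraint_keys : List String) : List (List (String × String)) :=
  let keys := entries.map (fun e => pvKeyOf e constraint_keys)
  -- last = dict(zip(keys, entries)): sequential insertion, later pairs overwrite
  let last : PySem.Dict (List (Option String)) (List (String × String)) :=
    (keys.zip entries).foldl (fun d p => d.insert p.1 p.2) PySem.Dict.empty
  -- second pass: emit last[key] at each key's first occurrence
  -- (last[key] is ported as getD with default []: every key of `keys` is present in `last`,
  --  so the default is never used and the Python never raises)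
  (keys.foldl
    (fun (st : PySem.Set (List (Option String)) × List (List (String × String))) key =>
      if PySem.Set.contains st.1 key then st
      else (PySem.Set.add st.1 key, st.2 ++ [last.getD key []]))
    (PySem.Set.empty, [])).2

-- ===== PRECONDITION & SPEC =====
def Spec_dedup_by_constraint_py (entries : List (List (String × String))) (constraint_keys : List String) (out : List (List (String × String))) : Prop := out = dedup_by_constraint_py_alt entries constraint_keys
instance (entries : List (List (String × String))) (constraint_keys : List String) (out : List (List (String × String))) : Decidable (Spec_dedup_by_constraint_py entries constraint_keys out) := by unfold Spec_dedup_by_constraint_py; infer_instance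

-- ===== CLAIM (what is proved, stated in full; the proofs are below) =====
def Claim_equal_dedup_by_constraint_py : Prop := ∀ (entries : List (List (String × String))) (constraint_keys : List String), Dom_dedup_by_constraint_py entries constraint_keys → Spec_dedup_by_constraint_py entries constraint_keys (dedup_by_constraint_py entries constraint_keys)

-- ===== LEMMAS AND PROOFS =====

-- Set.update only appends: the starting list is a prefix of the result
theorem pv_prefix_update {K : Type} [BEq K] (s : List K) (ks : List K) :
    s <+: PySem.Set.update s ks := by
  induction ks generalizing s with
  | nil => simp [PySem.Set.update]
  | cons k tl ih =>
      show s <+: PySem.Set.update (PySem.Set.add s k) tl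
      refine List.IsPrefix.trans ?_ (ih (PySem.Set.add s k))
      by_cases h : List.contains s k <;> simp [PySem.Set.add, PySem.Set.contains, h]

-- the second pass emits f at the NEW keys, i.e. the suffix Set.update appends
theorem pv_pass2 {K V : Type} [BEq K] (f : K → V) (ks : List K) (s : PySem.Set K) (acc : List V) :
    (ks.foldl
      (fun (st : PySem.Set K × List V) k =>
        if PySem.Set.contains st.1 k then st else (PySem.Set.add st.1 k, st.2 ++ [f k]))
      (s, acc)).2
    = acc ++ ((PySem.Set.update s ks).drop s.length).map f := by
  induction ks generalizing s acc with
  | nil => simp [PySem.Set.update, List.drop_length]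
  | cons k tl ih =>
      simp only [List.foldl_cons]
      by_cases h : List.contains s k
      · rw [if_pos (by simpa [PySem.Set.contains] using h)]
        have hadd : PySem.Set.add s k = s := by simp [PySem.Set.add, PySem.Set.contains, h]
        have := ih s acc
        simpa [PySem.Set.update, hadd] using this
      · rw [if_neg (by simpa [PySem.Set.contains] using h)]
        have hadd : PySem.Set.add s k = s ++ [k] := by simp [PySem.Set.add, PySem.Set.contains, h]
        have hupd : PySem.Set.update s (k :: tl) = PySem.Set.update (s ++ [k]) tl := by
          simp [PySem.Set.update, hadd]
        rw [hupd, hadd, ih (s ++ [k]) (acc ++ [f k])]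
        obtain ⟨r, hr⟩ := pv_prefix_update (s ++ [k]) tl
        rw [← hr]
        simp

-- ===== VERDICT (by name: the statement is the Claim_ definition above) =====
theorem dedup_by_constraint_py_spec : Claim_equal_dedup_by_constraint_py := by
  intro entries constraint_keys _
  show dedup_by_constraint_py entries constraint_keys = dedup_by_constraint_py_alt entries constraint_keys
  have hzip : (entries.map (fun e => pvKeyOf e constraint_keys)).zip entries
      = entries.map (fun e => (pvKeyOf e constraint_keys, e)) := by
    simpa using (List.zip_map' (f := fun e => pvKeyOf e constraint_keys) (g := id) (l := entries))
  have hnd : (entries.foldl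
      (fun (seen : PySem.Dict (List (Option String)) (List (String × String))) entry =>
        seen.insert (pvKeyOf entry constraint_keys) entry) PySem.Dict.empty).keys.Nodup :=
    PySem.Dict.nodup_keys_foldl_insert_key entries (fun e => pvKeyOf e constraint_keys)
      (fun _ e => e) PySem.Dict.empty PySem.Dict.nodup_keys_empty
  have hkeys := PySem.Dict.keys_foldl_insert_key entries (fun e => pvKeyOf e constraint_keys)
      (fun _ e => e) PySem.Dict.empty
  simp only [dedup_by_constraint_py, dedup_by_constraint_py_alt]
  rw [pv_pass2]
  rw [PySem.Dict.values_eq_map_keys _ hnd [], hkeys]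
  simp [hzip, List.foldl_map, PySem.Set.empty, PySem.Dict.keys_empty]
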